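-- pv_equiv track=rewrite | github.com/qianwenyuan/typesql_ch | data_process_train_dev.py | get_header_col
-- ===== SOURCE A (Python) =====
-- def levenshteinDistance(s1, s2):
--     if len(s1) > len(s2):
--         s1, s2 = s2, s1
--
--     distances = range(len(s1) + 1)
--     for i2, c2 in enumerate(s2):
--         distances_ = [i2+1]
--         for i1, c1 in enumerate(s1):
--             if c1 == c2:
--                 distances_.append(distances[i1])
--             else:
--                 distances_.append(1 + min((distances[i1], distances[i1 + 1], distances_[-1])))
--         distances = distances_
--     return distances[-1]
--
-- def get_header_col(tokens, idx, num_toks, header_tok):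
--     for endIdx in reversed(range(idx+1, num_toks+1)):
--         sub_toks = tokens[idx: endIdx]
--         if sub_toks in header_tok:
--             return endIdx, sub_toks
--         else:
--             str = "".join(sub_toks)
--             for column in header_tok:
--                 str_col = "".join(column)
--                 if levenshteinDistance(str, str_col) == 1:
--                     return endIdx, sub_toks
--     return None
-- ===== SOURCE B (Python) =====
-- def _dist_is_one(a, b):
--     # True iff the Levenshtein distance between a and b is exactly 1.
--     la, lb = len(a), len(b)
--     if la == lb:
--         mismatches = sum(1 for x, y in zip(a, b) if x != y)
--         return mismatches == 1
--     if la > lb: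
--         a, b = b, a
--         la, lb = lb, la
--     if lb - la != 1:
--         return False
--     i = 0
--     while i < la and a[i] == b[i]:
--         i += 1
--     return a[i:] == b[i + 1:]
--
-- def get_header_col(tokens, idx, num_toks, header_tok):
--     joined_cols = ["".join(column) for column in header_tok]
--     for endIdx in reversed(range(idx + 1, num_toks + 1)):
--         sub_toks = tokens[idx:endIdx]
--         if sub_toks in header_tok:
--             return endIdx, sub_toks
--         s = "".join(sub_toks)
--         for str_col in joined_cols:
--             if _dist_is_one(s, str_col):
--                 return endIdx, sub_toks
--     return None
-- ===== Notes on version B (the rewrite author's own statement) =====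
-- stated objective: alternative
-- what changed: Replaces the full Levenshtein DP table computation (whose result is only ever compared to 1) with a direct one-edit test (equal lengths: exactly one mismatch; lengths differing by 1: skip the common prefix and compare remainders), and hoists the joining of header columns out of the endIdx loop.
import Mathlib
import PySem

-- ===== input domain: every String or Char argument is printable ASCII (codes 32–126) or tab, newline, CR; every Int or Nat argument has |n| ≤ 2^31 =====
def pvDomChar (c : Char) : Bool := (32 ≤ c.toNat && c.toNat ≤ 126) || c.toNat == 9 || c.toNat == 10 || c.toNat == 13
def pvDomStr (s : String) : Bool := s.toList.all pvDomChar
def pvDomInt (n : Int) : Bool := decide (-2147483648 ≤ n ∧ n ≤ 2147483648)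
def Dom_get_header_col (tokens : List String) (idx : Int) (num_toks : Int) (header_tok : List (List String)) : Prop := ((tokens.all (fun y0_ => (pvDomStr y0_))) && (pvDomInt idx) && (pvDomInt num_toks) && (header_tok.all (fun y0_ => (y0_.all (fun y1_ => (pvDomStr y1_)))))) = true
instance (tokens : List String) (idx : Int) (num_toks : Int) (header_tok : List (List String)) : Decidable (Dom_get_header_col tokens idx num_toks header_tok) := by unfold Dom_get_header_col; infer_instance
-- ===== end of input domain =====

-- B replaces A's full Levenshtein DP (whose result is only ever compared to 1) by a direct
-- one-edit test and hoists the joining of header columns out of the loop; same return value.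

-- ===== PORT A =====
-- one row-update of A's DP: `distances_ = [i2+1]; for i1, c1 in enumerate(s1): …`
def levA_inner (distances : List Int) (t1 : List Char) (i2 : Int) (c2 : Char) : List Int :=
  (PySem.List.enumerate t1).foldl
    (fun d_ p =>
      if p.2 = c2 then d_ ++ [PySem.List.pyGetD distances p.1 0]
      else d_ ++ [1 + min (min (PySem.List.pyGetD distances p.1 0)
                               (PySem.List.pyGetD distances (p.1 + 1) 0))
                          (PySem.List.pyGetD d_ (-1) 0)])
    [i2 + 1]

def levA (s1 s2 : String) : Int :=
  -- `if len(s1) > len(s2): s1, s2 = s2, s1`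
  let p := if s1.toList.length > s2.toList.length then (s2.toList, s1.toList) else (s1.toList, s2.toList)
  let t1 := p.1
  let t2 := p.2
  -- `distances = range(len(s1) + 1)`
  let init : List Int := PySem.List.pyRange 0 ((t1.length : Int) + 1) 1
  -- outer loop `for i2, c2 in enumerate(s2)`
  let final := (PySem.List.enumerate t2).foldl (fun distances q => levA_inner distances t1 q.1 q.2) init
  PySem.List.pyGetD final (-1) 0   -- `distances[-1]`; the row is never empty

-- the `for endIdx in reversed(range(idx+1, num_toks+1))` loop with its early returns;
-- `reversed(range(...))` is a lazy countdown num_toks, num_toks-1, …, idx+1: ported as a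
-- countdown recursion (fuel = the number of iterations, (num_toks - idx).toNat)
def goA (tokens : List String) (idx : Int) (header_tok : List (List String)) : Nat → Int → Option (Int × List String)
  | 0, _ => none
  | fuel + 1, e =>
    let sub := PySem.List.slice tokens (some idx) (some e)
    if header_tok.contains sub then some (e, sub)
    else if header_tok.any (fun column =>
            levA (PySem.Str.join "" sub) (PySem.Str.join "" column) == 1) then some (e, sub)
    else goA tokens idx header_tok fuel (e - 1)

def get_header_col (tokens : List String) (idx : Int) (num_toks : Int) (header_tok : List (List String)) : Option (Int × List String) :=
  goA tokens idx header_tok (num_toks - idx).toNat num_toks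

-- ===== PORT B =====
-- `sum(1 for x, y in zip(a, b) if x != y)`
def mismB (a b : List Char) : Nat :=
  ((a.zip b).map (fun p => if p.1 ≠ p.2 then 1 else 0)).sum

-- the `while i < la and a[i] == b[i]: i += 1` scan (length of the common prefix, a the shorter)
def cpB : List Char → List Char → Nat
  | x :: xs, y :: ys => if x = y then cpB xs ys + 1 else 0
  | _, _ => 0

def distOneB (a b : List Char) : Bool :=
  if a.length = b.length then mismB a b == 1
  else
    let p := if a.length > b.length then (b, a) else (a, b)
    if p.2.length - p.1.length ≠ 1 then false
    else
      let i := cpB p.1 p.2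
      p.1.drop i == p.2.drop (i + 1)   -- `a[i:] == b[i+1:]`

def goB (tokens : List String) (idx : Int) (header_tok : List (List String)) (joined : List String) : Nat → Int → Option (Int × List String)
  | 0, _ => none
  | fuel + 1, e =>
    let sub := PySem.List.slice tokens (some idx) (some e)
    if header_tok.contains sub then some (e, sub)
    else if joined.any (fun sc => distOneB (PySem.Str.join "" sub).toList sc.toList) then some (e, sub)
    else goB tokens idx header_tok joined fuel (e - 1)

def get_header_col_alt (tokens : List String) (idx : Int) (num_toks : Int) (header_tok : List (List String)) : Option (Int × List String) :=
  goB tokens idx header_tok (header_tok.map (fun column => PySem.Str.join "" column))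
    (num_toks - idx).toNat num_toks

-- ===== PRECONDITION & SPEC =====
def Spec_get_header_col (tokens : List String) (idx : Int) (num_toks : Int) (header_tok : List (List String)) (out : Option (Int × List String)) : Prop := out = get_header_col_alt tokens idx num_toks header_tok
instance (tokens : List String) (idx : Int) (num_toks : Int) (header_tok : List (List String)) (out : Option (Int × List String)) : Decidable (Spec_get_header_col tokens idx num_toks header_tok out) := by unfold Spec_get_header_col; infer_instance

-- ===== CLAIM (what is proved, stated in full; the proofs are below) =====
def Claim_equal_get_header_col : Prop := ∀ (tokens : List String) (idx : Int) (num_toks : Int) (header_tok : List (List String)), Dom_get_header_col tokens idx num_toks header_tok → Spec_get_header_col tokens idx num_toks header_tok (get_header_col tokens idx num_toks header_tok)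

-- ===== LEMMAS AND PROOFS =====

def lev : List Char → List Char → Nat
  | [], t => t.length
  | a :: s, [] => s.length + 1
  | a :: s, b :: t =>
    if a = b then lev s t
    else 1 + min (min (lev s (b :: t)) (lev (a :: s) t)) (lev s t)
termination_by s t => s.length + t.length
decreasing_by all_goals (simp only [List.length_cons]; omega)

def OneEdit (x y : List Char) : Prop :=
  (∃ p c d q, c ≠ d ∧ x = p ++ c :: q ∧ y = p ++ d :: q) ∨
  (∃ p c q, x = p ++ q ∧ y = p ++ c :: q) ∨
  (∃ p c q, x = p ++ c :: q ∧ y = p ++ q)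

theorem lev_nil_right (s : List Char) : lev s [] = s.length := by
  cases s <;> simp [lev]

theorem lev_eq_zero (s t : List Char) : lev s t = 0 ↔ s = t := by
  fun_induction lev s t with
  | case1 t => simp [List.length_eq_zero_iff, eq_comm]
  | case2 a s => simp
  | case3 w x y z => simp_all
  | case4 a s b t h ih1 ih2 ih3 => simp [h]

theorem oneEdit_nil_left (t : List Char) : OneEdit [] t ↔ ∃ c, t = [c] := by
  constructor
  · rintro (⟨p,c,d,q,hcd,hx,hy⟩|⟨p,c,q,hx,hy⟩|⟨p,c,q,hx,hy⟩)
    · exact absurd hx.symm (by simp)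
    · obtain ⟨hp, hq⟩ := List.append_eq_nil_iff.mp hx.symm
      subst hp hq; exact ⟨c, by simpa using hy⟩
    · exact absurd hx.symm (by simp)
  · rintro ⟨c, rfl⟩; exact Or.inr (Or.inl ⟨[], c, [], rfl, rfl⟩)

theorem oneEdit_nil_right (s : List Char) : OneEdit s [] ↔ ∃ c, s = [c] := by
  constructor
  · rintro (⟨p,c,d,q,hcd,hx,hy⟩|⟨p,c,q,hx,hy⟩|⟨p,c,q,hx,hy⟩)
    · exact absurd hy.symm (by simp)
    · exact absurd hy.symm (by simp)
    · obtain ⟨hp, hq⟩ := List.append_eq_nil_iff.mp hy.symm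
      subst hp hq; exact ⟨c, by simpa using hx⟩
  · rintro ⟨c, rfl⟩; exact Or.inr (Or.inr ⟨[], c, [], rfl, rfl⟩)

theorem oneEdit_cons_same (a : Char) (s t : List Char) :
    OneEdit (a :: s) (a :: t) ↔ OneEdit s t := by
  constructor
  · rintro (⟨p,c,d,q,hcd,hx,hy⟩|⟨p,c,q,hx,hy⟩|⟨p,c,q,hx,hy⟩)
    · cases p with
      | nil =>
        simp at hx hy
        exact absurd (hx.1.symm.trans hy.1) hcd
      | cons e p =>
        simp at hx hy
        exact Or.inl ⟨p, c, d, q, hcd, hx.2, hy.2⟩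
    · cases p with
      | nil =>
        simp at hx hy
        subst hx
        obtain ⟨rfl, rfl⟩ := hy
        exact Or.inr (Or.inl ⟨[], a, s, rfl, rfl⟩)
      | cons e p =>
        simp at hx hy
        exact Or.inr (Or.inl ⟨p, c, q, hx.2, hy.2⟩)
    · cases p with
      | nil =>
        simp at hx hy
        subst hy
        obtain ⟨rfl, rfl⟩ := hx
        exact Or.inr (Or.inr ⟨[], a, t, rfl, rfl⟩)
      | cons e p =>
        simp at hx hy
        exact Or.inr (Or.inr ⟨p, c, q, hx.2, hy.2⟩)
  · rintro (⟨p,c,d,q,hcd,hx,hy⟩|⟨p,c,q,hx,hy⟩|⟨p,c,q,hx,hy⟩)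
    · exact Or.inl ⟨a :: p, c, d, q, hcd, by simp [hx], by simp [hy]⟩
    · exact Or.inr (Or.inl ⟨a :: p, c, q, by simp [hx], by simp [hy]⟩)
    · exact Or.inr (Or.inr ⟨a :: p, c, q, by simp [hx], by simp [hy]⟩)

theorem oneEdit_cons_ne (a b : Char) (s t : List Char) (h : a ≠ b) :
    OneEdit (a :: s) (b :: t) ↔ (s = b :: t ∨ a :: s = t ∨ s = t) := by
  constructor
  · rintro (⟨p,c,d,q,hcd,hx,hy⟩|⟨p,c,q,hx,hy⟩|⟨p,c,q,hx,hy⟩)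
    · cases p with
      | nil =>
        simp at hx hy
        obtain ⟨rfl, rfl⟩ := hx; obtain ⟨rfl, rfl⟩ := hy
        exact Or.inr (Or.inr rfl)
      | cons e p =>
        simp at hx hy
        exact absurd (hx.1.trans hy.1.symm) h
    · cases p with
      | nil =>
        simp at hx hy
        subst hx
        obtain ⟨rfl, rfl⟩ := hy
        exact Or.inr (Or.inl rfl)
      | cons e p =>
        simp at hx hy
        exact absurd (hx.1.trans hy.1.symm) h
    · cases p with
      | nil =>
        simp at hx hy
        subst hy
        obtain ⟨rfl, rfl⟩ := hx
        exact Or.inl rfl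
      | cons e p =>
        simp at hx hy
        exact absurd (hx.1.trans hy.1.symm) h
  · rintro (rfl | rfl | rfl)
    · exact Or.inr (Or.inr ⟨[], a, b :: t, rfl, rfl⟩)
    · exact Or.inr (Or.inl ⟨[], b, a :: s, rfl, rfl⟩)
    · exact Or.inl ⟨[], a, b, s, h, rfl, rfl⟩

theorem lev_eq_one (s t : List Char) : lev s t = 1 ↔ OneEdit s t := by
  fun_induction lev s t with
  | case1 t => rw [oneEdit_nil_left]; simp [List.length_eq_one_iff]
  | case2 a s => rw [oneEdit_nil_right]; simp
  | case3 w x y z =>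
    rw [oneEdit_cons_same]; exact z
  | case4 a s b t h ih1 ih2 ih3 =>
    rw [oneEdit_cons_ne a b s t h]
    have h1 : (1 + min (min (lev s (b :: t)) (lev (a :: s) t)) (lev s t) = 1) ↔
        (min (min (lev s (b :: t)) (lev (a :: s) t)) (lev s t) = 0) := by omega
    rw [h1]
    simp [Nat.min_eq_zero_iff, lev_eq_zero]

theorem oneEdit_swap {x y : List Char} (h : OneEdit x y) : OneEdit y x := by
  rcases h with ⟨p,c,d,q,hcd,hx,hy⟩|⟨p,c,q,hx,hy⟩|⟨p,c,q,hx,hy⟩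
  · exact Or.inl ⟨p, d, c, q, hcd.symm, hy, hx⟩
  · exact Or.inr (Or.inr ⟨p, c, q, hy, hx⟩)
  · exact Or.inr (Or.inl ⟨p, c, q, hy, hx⟩)

theorem oneEdit_symm (x y : List Char) : OneEdit x y ↔ OneEdit y x :=
  ⟨oneEdit_swap, oneEdit_swap⟩

theorem oneEdit_rev_of {x y : List Char} (h : OneEdit x y) :
    OneEdit x.reverse y.reverse := by
  rcases h with ⟨p,c,d,q,hcd,rfl,rfl⟩|⟨p,c,q,rfl,rfl⟩|⟨p,c,q,rfl,rfl⟩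
  · exact Or.inl ⟨q.reverse, c, d, p.reverse, hcd, by simp, by simp⟩
  · exact Or.inr (Or.inl ⟨q.reverse, c, p.reverse, by simp, by simp⟩)
  · exact Or.inr (Or.inr ⟨q.reverse, c, p.reverse, by simp, by simp⟩)

theorem oneEdit_reverse (x y : List Char) : OneEdit x.reverse y.reverse ↔ OneEdit x y :=
  ⟨fun h => by simpa using oneEdit_rev_of h, oneEdit_rev_of⟩

theorem oneEdit_length {x y : List Char} (h : OneEdit x y) :
    y.length = x.length + 1 ∨ x.length = y.length ∨ x.length = y.length + 1 := by
  rcases h with ⟨p,c,d,q,hcd,rfl,rfl⟩|⟨p,c,q,rfl,rfl⟩|⟨p,c,q,rfl,rfl⟩ <;> simp <;> omega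

theorem mismB_cons (a b : Char) (x y : List Char) :
    mismB (a :: x) (b :: y) = (if a = b then 0 else 1) + mismB x y := by
  by_cases h : a = b <;> simp [mismB, h]

theorem mismB_eq_zero (x : List Char) : ∀ (y : List Char), x.length = y.length →
    (mismB x y = 0 ↔ x = y) := by
  induction x with
  | nil => intro y hy; simp [(List.length_eq_zero_iff).mp hy.symm, mismB]
  | cons a x ih =>
    intro y hy
    cases y with
    | nil => simp at hy
    | cons b y =>
      simp only [List.length_cons] at hy
      rw [mismB_cons]
      by_cases h : a = b <;> simp [h, ih y (by omega)]

theorem mismB_eq_one (x : List Char) : ∀ (y : List Char), x.length = y.length →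
    (mismB x y = 1 ↔ OneEdit x y) := by
  induction x with
  | nil =>
    intro y hy
    rw [oneEdit_nil_left]
    simp [(List.length_eq_zero_iff).mp hy.symm, mismB]
  | cons a x ih =>
    intro y hy
    cases y with
    | nil => simp at hy
    | cons b y =>
      simp only [List.length_cons] at hy
      rw [mismB_cons]
      by_cases h : a = b
      · subst h
        rw [oneEdit_cons_same]
        simp [ih y (by omega)]
      · rw [oneEdit_cons_ne a b x y h]
        have h2 : x ≠ b :: y := by intro he; rw [he] at hy; simp at hy
        have h3 : a :: x ≠ y := by intro he; rw [← he] at hy; simp at hy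
        simp [h, h2, h3, mismB_eq_zero x y (by omega)]

theorem cpB_drop (x : List Char) : ∀ (y : List Char), y.length = x.length + 1 →
    ((x.drop (cpB x y) == y.drop (cpB x y + 1)) = true ↔ OneEdit x y) := by
  induction x with
  | nil =>
    intro y hy
    obtain ⟨c, rfl⟩ := List.length_eq_one_iff.mp hy
    simp [cpB, oneEdit_nil_left]
  | cons a x ih =>
    intro y hy
    cases y with
    | nil => simp at hy
    | cons b y =>
      simp only [List.length_cons] at hy
      by_cases h : a = b
      · subst h
        rw [oneEdit_cons_same]
        simpa [cpB] using ih y (by omega)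
      · rw [oneEdit_cons_ne a b x y h]
        have h2 : x ≠ b :: y := by intro he; rw [he] at hy; simp at hy
        have h3 : x ≠ y := by intro he; rw [he] at hy; omega
        simp [cpB, h, h2, h3]

theorem distOneB_iff (x y : List Char) : (distOneB x y = true ↔ OneEdit x y) := by
  unfold distOneB
  by_cases he : x.length = y.length
  · simp only [he, if_pos, beq_iff_eq]
    exact mismB_eq_one x y he
  · rw [if_neg he]
    by_cases hg : x.length > y.length
    · simp only [hg, if_true]
      by_cases h1 : x.length - y.length = 1
      · have hx : x.length = y.length + 1 := by omega
        rw [oneEdit_symm]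
        simpa [h1] using cpB_drop y x hx
      · have hno : ¬ OneEdit x y := by
          intro h; rcases oneEdit_length h with h' | h' | h' <;> omega
        simp [h1, hno]
    · simp only [hg, if_false]
      by_cases h1 : y.length - x.length = 1
      · have hy : y.length = x.length + 1 := by omega
        simpa [h1] using cpB_drop x y hy
      · have hno : ¬ OneEdit x y := by
          intro h; rcases oneEdit_length h with h' | h' | h' <;> omega
        simp [h1, hno]

def rowTo (t1 p : List Char) (m : Nat) : List Int :=
  (List.range (m + 1)).map (fun i => ((lev ((t1.take i).reverse) p.reverse : Nat) : Int))

theorem rowTo_get (t1 p : List Char) (m k : Nat) (hk : k ≤ m) :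
    PySem.List.pyGetD (rowTo t1 p m) (k : Int) 0
      = ((lev ((t1.take k).reverse) p.reverse : Nat) : Int) := by
  simp [rowTo, PySem.List.pyGetD_natCast, List.getD_eq_getElem?_getD, Nat.lt_succ_of_le hk]

theorem rowTo_succ (t1 p : List Char) (m : Nat) :
    rowTo t1 p (m + 1) = rowTo t1 p m ++ [((lev ((t1.take (m+1)).reverse) p.reverse : Nat) : Int)] := by
  simp [rowTo, List.range_succ]

theorem rowTo_last (t1 p : List Char) (m : Nat) :
    PySem.List.pyGetD (rowTo t1 p m) (-1) 0
      = ((lev ((t1.take m).reverse) p.reverse : Nat) : Int) := by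
  cases m with
  | zero =>
    have h0 : rowTo t1 p 0 = [] ++ [((lev ((t1.take 0).reverse) p.reverse : Nat) : Int)] := by
      simp [rowTo]
    rw [h0, PySem.List.pyGetD_neg_one_append_singleton]
  | succ m => rw [rowTo_succ]; exact PySem.List.pyGetD_neg_one_append_singleton _ _ _

theorem lev_cons_same (a : Char) (s t : List Char) : lev (a :: s) (a :: t) = lev s t := by
  rw [lev.eq_def]; simp

theorem lev_cons_cons (a b : Char) (s t : List Char) (h : ¬ a = b) :
    lev (a :: s) (b :: t) = 1 + min (min (lev s (b :: t)) (lev (a :: s) t)) (lev s t) := by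
  rw [lev.eq_def]; simp [h]

theorem inner_aux (pdone : List Char) (c : Char) (t1 : List Char) :
    ∀ (suff pref : List Char), pref ++ suff = t1 →
    (PySem.List.enumerate suff (pref.length : Int)).foldl
      (fun d_ p =>
        if p.2 = c then d_ ++ [PySem.List.pyGetD (rowTo t1 pdone t1.length) p.1 0]
        else d_ ++ [1 + min (min (PySem.List.pyGetD (rowTo t1 pdone t1.length) p.1 0)
                                 (PySem.List.pyGetD (rowTo t1 pdone t1.length) (p.1 + 1) 0))
                            (PySem.List.pyGetD d_ (-1) 0)])
      (rowTo t1 (pdone ++ [c]) pref.length)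
      = rowTo t1 (pdone ++ [c]) t1.length := by
  intro suff
  induction suff with
  | nil => intro pref hp; rw [PySem.List.enumerate_nil, List.foldl_nil, ← hp, List.append_nil]
  | cons ch suff ih =>
    intro pref hp
    rw [PySem.List.enumerate_cons, List.foldl_cons]
    have hlen : pref.length ≤ t1.length := by rw [← hp]; simp
    have hlen1 : pref.length + 1 ≤ t1.length := by rw [← hp]; simp
    have htake : t1.take pref.length = pref := by rw [← hp]; simp
    have htake1 : t1.take (pref.length + 1) = pref ++ [ch] := by
      rw [← hp, List.take_append]; simp
    have hstep :
        (if ch = c then  rowTo t1 (pdone ++ [c]) pref.length ++ [PySem.List.pyGetD (rowTo t1 pdone t1.length) ((pref.length : Int)) 0]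
         else rowTo t1 (pdone ++ [c]) pref.length ++ [1 + min (min (PySem.List.pyGetD (rowTo t1 pdone t1.length) ((pref.length : Int)) 0)
                                 (PySem.List.pyGetD (rowTo t1 pdone t1.length) (((pref.length : Int)) + 1) 0))
                            (PySem.List.pyGetD (rowTo t1 (pdone ++ [c]) pref.length) (-1) 0)])
        = rowTo t1 (pdone ++ [c]) (pref.length + 1) := by
      rw [rowTo_succ, rowTo_get t1 pdone t1.length pref.length hlen, rowTo_last]
      have hc1 : ((pref.length : Int) + 1) = ((pref.length + 1 : Nat) : Int) := by push_cast; ring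
      rw [hc1, rowTo_get t1 pdone t1.length (pref.length + 1) hlen1]
      rw [htake, htake1]
      have hrev : (pref ++ [ch]).reverse = ch :: pref.reverse := by simp
      have hrev2 : (pdone ++ [c]).reverse = c :: pdone.reverse := by simp
      rw [hrev, hrev2]
      by_cases hc : ch = c
      · simp [hc, lev_cons_same]
      · rw [if_neg hc, lev_cons_cons ch c pref.reverse pdone.reverse hc]
        push_cast [Nat.cast_min]
        congr 1
        simp only [List.cons.injEq, and_true]
        omega
    rw [hstep]
    have happ : (pref ++ [ch]) ++ suff = t1 := by simpa [List.append_assoc] using hp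
    have hcast : ((pref.length : Int) + 1) = (((pref ++ [ch]).length : Nat) : Int) := by simp
    rw [hcast, show pref.length + 1 = (pref ++ [ch]).length from by simp]
    exact ih (pref ++ [ch]) happ

theorem lev_nil_left (t : List Char) : lev [] t = t.length := by
  rw [lev.eq_def]

theorem outer_aux (t1 : List Char) :
    ∀ (rest pdone : List Char),
    (PySem.List.enumerate rest (pdone.length : Int)).foldl
        (fun distances q => levA_inner distances t1 q.1 q.2) (rowTo t1 pdone t1.length)
      = rowTo t1 (pdone ++ rest) t1.length := by
  intro rest
  induction rest with
  | nil => intro pdone; simp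
  | cons c rest ih =>
    intro pdone
    rw [PySem.List.enumerate_cons, List.foldl_cons]
    have hrow0 : [(pdone.length : Int) + 1] = rowTo t1 (pdone ++ [c]) ([] : List Char).length := by
      simp [rowTo, lev_nil_left]
    have hstep : levA_inner (rowTo t1 pdone t1.length) t1 ((pdone.length : Int)) c
        = rowTo t1 (pdone ++ [c]) t1.length := by
      unfold levA_inner
      rw [hrow0]
      exact inner_aux pdone c t1 t1 [] rfl
    rw [hstep]
    have hcast : ((pdone.length : Int) + 1) = (((pdone ++ [c]).length : Nat) : Int) := by simp
    rw [hcast, ih (pdone ++ [c])]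
    simp

theorem levA_aux (t1 t2 : List Char) :
    PySem.List.pyGetD
      ((PySem.List.enumerate t2).foldl (fun distances q => levA_inner distances t1 q.1 q.2)
        (PySem.List.pyRange 0 ((t1.length : Int) + 1) 1)) (-1) 0
      = ((lev t1.reverse t2.reverse : Nat) : Int) := by
  have hinit : PySem.List.pyRange 0 ((t1.length : Int) + 1) 1 = rowTo t1 [] t1.length := by
    rw [PySem.List.pyRange_one]
    unfold rowTo
    have harg : ((t1.length : Int) + 1 - 0).toNat = t1.length + 1 := by omega
    rw [harg]
    apply List.map_congr_left
    intro i hi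
    simp at hi
    simp [lev_nil_right, List.length_take, Nat.min_eq_left hi]
  rw [hinit]
  have h0 : ((0 : Int)) = (([] : List Char).length : Int) := by simp
  rw [show PySem.List.enumerate t2 = PySem.List.enumerate t2 (([] : List Char).length : Int) from by simp]
  rw [outer_aux t1 t2 []]
  rw [rowTo_last]
  simp

theorem levA_eq_lev (s1 s2 : String) :
    levA s1 s2 = ((lev (if s1.toList.length > s2.toList.length then s2.toList.reverse else s1.toList.reverse)
                       (if s1.toList.length > s2.toList.length then s1.toList.reverse else s2.toList.reverse) : Nat) : Int) := by
  unfold levA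
  by_cases h : s1.toList.length > s2.toList.length <;>
    simp only [h, if_true, if_false] <;> exact levA_aux _ _

theorem levA_one (s1 s2 : String) :
    (levA s1 s2 == 1) = distOneB s1.toList s2.toList := by
  rw [levA_eq_lev, Bool.eq_iff_iff, beq_iff_eq, distOneB_iff, Nat.cast_eq_one]
  by_cases h : s1.toList.length > s2.toList.length
  · simp only [h, if_true]
    rw [lev_eq_one, oneEdit_reverse, oneEdit_symm]
  · simp only [h, if_false]
    rw [lev_eq_one, oneEdit_reverse]

theorem go_eq (tokens : List String) (idx : Int) (header_tok : List (List String)) :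
    ∀ (fuel : Nat) (e : Int), goA tokens idx header_tok fuel e
      = goB tokens idx header_tok (header_tok.map (fun column => PySem.Str.join "" column)) fuel e := by
  intro fuel
  induction fuel with
  | zero => intro e; simp [goA, goB]
  | succ fuel ih =>
    intro e
    simp only [goA, goB, List.any_map, Function.comp_def, levA_one, ih]

-- ===== VERDICT (by name: the statement is the Claim_ definition above) =====
theorem get_header_col_spec : Claim_equal_get_header_col := by
  intro tokens idx num_toks header_tok _
  unfold Spec_get_header_col get_header_col get_header_col_alt
  exact go_eq tokens idx header_tok _ _
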